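-- pv_equiv track=rewrite | github.com/PM-DAO/value-simulator | backend/src/simulator/engine.py | _downsample_sum
-- ===== SOURCE A (Python) =====
-- MAX_CHART_POINTS = 365
--
-- def _downsample_sum(data: list, max_points: int = MAX_CHART_POINTS) -> list:
--     """Downsample by summing buckets (for daily counts like adoption)."""
--     n = len(data)
--     if n <= max_points:
--         return data
--     bucket_size = (n + max_points - 1) // max_points
--     result = []
--     for i in range(0, n, bucket_size):
--         bucket = data[i : i + bucket_size]
--         result.append(sum(bucket))
--     return result
-- ===== SOURCE B (Python) =====
-- MAX_CHART_POINTS = 365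
--
-- def _downsample_sum(data: list, max_points: int = MAX_CHART_POINTS) -> list:
--     """Downsample by summing buckets: one flat pass with a running sum."""
--     n = len(data)
--     if n <= max_points:
--         return data
--     bucket_size = (n + max_points - 1) // max_points
--     result = []
--     acc = 0
--     count = 0
--     for x in data:
--         acc += x
--         count += 1
--         if count == bucket_size:
--             result.append(acc)
--             acc = 0
--             count = 0
--     if count:
--         result.append(acc)
--     return result
-- ===== Notes on version B (the rewrite author's own statement) =====
-- stated objective: alternative
-- what changed: Replaces the range/slice loop (build each bucket as an intermediate slice list, then sum it) by a single flat pass over the elements with a running accumulator and counter, flushing a bucket whenever the counter reaches bucket_size and flushing the trailing partial bucket after the loop; no intermediate lists are built.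
-- outside the precondition, e.g. on _downsample_sum([1, 2, 3], -1): A returns [], B returns [6]; on _downsample_sum([1, 2], 0): A raises ZeroDivisionError, B raises ZeroDivisionError
import Mathlib
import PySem

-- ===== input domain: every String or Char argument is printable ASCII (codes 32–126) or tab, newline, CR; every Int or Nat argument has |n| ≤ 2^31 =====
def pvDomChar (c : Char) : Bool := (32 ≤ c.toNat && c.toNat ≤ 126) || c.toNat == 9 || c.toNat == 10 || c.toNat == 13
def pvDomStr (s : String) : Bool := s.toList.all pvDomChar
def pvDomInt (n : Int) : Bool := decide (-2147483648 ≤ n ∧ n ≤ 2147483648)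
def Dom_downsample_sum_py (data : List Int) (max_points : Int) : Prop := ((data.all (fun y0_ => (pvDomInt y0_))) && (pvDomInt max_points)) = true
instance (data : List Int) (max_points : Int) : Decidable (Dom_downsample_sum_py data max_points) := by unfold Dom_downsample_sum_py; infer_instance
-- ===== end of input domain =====

-- B replaces A's range/slice bucket loop by one flat pass with a running accumulator and counter (no intermediate slice lists); same cost class (objective: alternative).

-- ===== PORT A =====
def downsample_sum_py (data : List Int) (max_points : Int) : List Int :=
  let n : Int := data.length
  if n ≤ max_points then data
  else
    let bucket_size := PySem.Int.floordiv (n + max_points - 1) max_points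
    (PySem.List.pyRange 0 n bucket_size).foldl
      (fun result i =>
        result ++ [(PySem.List.slice data (some i) (some (i + bucket_size))).sum]) []

-- ===== PORT B =====
def downsample_sum_py_alt (data : List Int) (max_points : Int) : List Int :=
  let n : Int := data.length
  if n ≤ max_points then data
  else
    let bucket_size := PySem.Int.floordiv (n + max_points - 1) max_points
    let st := data.foldl
      (fun (s : List Int × Int × Int) x =>
        let acc := s.2.1 + x
        let count := s.2.2 + 1
        if count = bucket_size then (s.1 ++ [acc], 0, 0) else (s.1, acc, count))
      ([], 0, 0)
    if st.2.2 ≠ 0 then st.1 ++ [st.2.1] else st.1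

-- ===== PRECONDITION & SPEC =====
-- Pre_ excludes nonempty data with max_points ≤ 0 (a meaningless request): there A divides by zero
-- (max_points = 0) or feeds a non-positive step to range and returns [] as an accident of range's
-- behaviour, while B's division/accumulator does the natural thing.
def Pre_downsample_sum_py (data : List Int) (max_points : Int) : Prop :=
  0 < max_points ∨ (data.length : Int) ≤ max_points ∨ data = []
instance (data : List Int) (max_points : Int) : Decidable (Pre_downsample_sum_py data max_points) := by
  unfold Pre_downsample_sum_py; infer_instance
def pvWitness_downsample_sum_py : List Int × Int := ([1, 2, 3], 2)

def Spec_downsample_sum_py (data : List Int) (max_points : Int) (out : List Int) : Prop := out = downsample_sum_py_alt data max_points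
instance (data : List Int) (max_points : Int) (out : List Int) : Decidable (Spec_downsample_sum_py data max_points out) := by unfold Spec_downsample_sum_py; infer_instance

-- ===== CLAIM (what is proved, stated in full; the proofs are below) =====
def Claim_equal_downsample_sum_py : Prop := ∀ (data : List Int) (max_points : Int), Dom_downsample_sum_py data max_points → Pre_downsample_sum_py data max_points → Spec_downsample_sum_py data max_points (downsample_sum_py data max_points)

-- ===== LEMMAS AND PROOFS =====

-- The common specification of one bucketing pass: sums of consecutive blocks of size b.
def chunkSum (b : Nat) : List Int → List Int
  | [] => []
  | x :: xs => (x :: xs.take (b - 1)).sum :: chunkSum b (xs.drop (b - 1))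
termination_by l => l.length
decreasing_by simp

theorem chunkSum_nonempty {b : Nat} (hb : 0 < b) {l : List Int} (hl : l ≠ []) :
    chunkSum b l = (l.take b).sum :: chunkSum b (l.drop b) := by
  cases l with
  | nil => exact absurd rfl hl
  | cons x xs =>
      rw [chunkSum]
      obtain ⟨b', rfl⟩ : ∃ b', b = b' + 1 := ⟨b - 1, by omega⟩
      simp

theorem chunkSum_small {b : Nat} {l : List Int} (hl : l ≠ []) (h : l.length < b) :
    chunkSum b l = [l.sum] := by
  cases l with
  | nil => exact absurd rfl hl
  | cons x xs =>
      rw [chunkSum]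
      have ht : xs.take (b - 1) = xs := List.take_of_length_le (by simp at h ⊢; omega)
      have hd : xs.drop (b - 1) = [] := List.drop_eq_nil_of_le (by simp at h ⊢; omega)
      simp [ht, hd, chunkSum]

-- A's loop: the map of block sums over range indices equals chunkSum.
theorem rangeChunk (b : Nat) (hb : 0 < b) :
    ∀ (c : Nat) (data : List Int), data.length ≤ c * b → c * b < data.length + b →
      (List.range c).map (fun k => ((data.drop (b * k)).take b).sum) = chunkSum b data := by
  intro c
  induction c with
  | zero =>
      intro data h1 _
      have : data = [] := List.length_eq_zero_iff.mp (by omega)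
      simp [this, chunkSum]
  | succ c ih =>
      intro data h1 h2
      have hcb : (c + 1) * b = c * b + b := by ring
      have hpos : 0 < data.length := by nlinarith [Nat.zero_le (c * b)]
      have hne : data ≠ [] := by
        cases data with
        | nil => simp at hpos
        | cons x xs => simp
      rw [List.range_succ_eq_map, List.map_cons, List.map_map]
      have hmap : (List.range c).map ((fun k => ((data.drop (b * k)).take b).sum) ∘ Nat.succ)
          = (List.range c).map (fun k => (((data.drop b).drop (b * k)).take b).sum) := by
        apply List.map_congr_left
        intro k _
        simp [List.drop_drop]
        ring_nf
      rw [hmap, ih (data.drop b) (by simp; omega) (by simp; omega)]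
      rw [chunkSum_nonempty hb hne]
      simp [Nat.mul_comm]

-- B's loop invariant: pre is the current partial bucket (acc = pre.sum, count = pre.length < b).
theorem loopChunk (b : Nat) (hb : 0 < b) :
    ∀ (data res pre : List Int), pre.length < b →
      (let st := data.foldl
          (fun (s : List Int × Int × Int) x =>
            let acc := s.2.1 + x
            let count := s.2.2 + 1
            if count = (b : Int) then (s.1 ++ [acc], 0, 0) else (s.1, acc, count))
          (res, pre.sum, (pre.length : Int));
        if st.2.2 ≠ 0 then st.1 ++ [st.2.1] else st.1)
      = res ++ chunkSum b (pre ++ data) := by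
  intro data
  induction data with
  | nil =>
      intro res pre hpre
      simp only [List.foldl_nil, List.append_nil]
      by_cases hp : pre = []
      · simp [hp, chunkSum]
      · have : (pre.length : Int) ≠ 0 := by
          have : pre.length ≠ 0 := fun h => hp (List.length_eq_zero_iff.mp h)
          exact_mod_cast this
        simp only [this, if_pos, ne_eq, not_false_eq_true, if_true]
        rw [chunkSum_small hp hpre]
  | cons x data ih =>
      intro res pre hpre
      simp only [List.foldl_cons]
      by_cases hfull : (pre.length : Int) + 1 = (b : Int)
      · have hfe : pre.length + 1 = b := by exact_mod_cast hfull
        simp only [hfull, if_pos]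
        have := ih (res ++ [pre.sum + x]) [] hb
        simp only [List.length_nil, Nat.cast_zero, List.sum_nil, List.nil_append] at this
        rw [this]
        have hsplit : pre ++ x :: data = (pre ++ [x]) ++ data := by simp
        rw [hsplit, chunkSum_nonempty hb (l := (pre ++ [x]) ++ data) (by simp)]
        have hlen : (pre ++ [x]).length = b := by simp; omega
        have htake : ((pre ++ [x]) ++ data).take b = pre ++ [x] := by
          rw [List.take_append]
          simp [hlen]
        have hdrop : ((pre ++ [x]) ++ data).drop b = data := by
          rw [List.drop_append]
          simp [hlen]
        rw [htake, hdrop]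
        simp
      · simp only [hfull, if_neg, if_false]
        have hlt : pre.length + 1 < b := by
          have : pre.length + 1 ≠ b := by intro h; exact hfull (by exact_mod_cast h)
          omega
        have := ih res (pre ++ [x]) (by simp; omega)
        simp only [List.sum_append, List.sum_cons, List.sum_nil, List.length_append,
          List.length_cons, List.length_nil, Nat.cast_add, Nat.cast_one, Nat.cast_zero,
          zero_add, List.append_assoc, List.cons_append, List.nil_append, add_zero] at this ⊢
        rw [← this]
  -- done

-- ===== VERDICT (by name: the statement is the Claim_ definition above) =====
theorem downsample_sum_py_spec : Claim_equal_downsample_sum_py := by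
  intro data mp _ hpre
  unfold Spec_downsample_sum_py downsample_sum_py downsample_sum_py_alt
  by_cases hle : (data.length : Int) ≤ mp
  · simp [hle]
  · simp only [hle, if_neg, if_false]
    rcases hpre with hmp | h | hnil
    · -- the real case: 0 < max_points, data.length > max_points
      obtain ⟨m, rfl⟩ : ∃ m : Nat, mp = (m : Int) := ⟨mp.toNat, by omega⟩
      have hm : 0 < m := by exact_mod_cast hmp
      have hN : (m : Int) < data.length := by omega
      have hNm : m < data.length := by exact_mod_cast hN
      set N := data.length with hNdef
      -- bucket_size as a natural number
      have hcast : (N : Int) + (m : Int) - 1 = ((N + m - 1 : Nat) : Int) := by push_cast; omega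
      have hbs : PySem.Int.floordiv ((N : Int) + (m : Int) - 1) (m : Int)
          = (((N + m - 1) / m : Nat) : Int) := by
        rw [hcast, PySem.Int.floordiv_natCast]
      set b : Nat := (N + m - 1) / m with hbdef
      have hb : 0 < b := by
        rw [hbdef]
        exact Nat.one_le_div_iff hm |>.mpr (by omega)
      rw [hbs]
      -- A's range, with positive step
      have hbpos : (0 : Int) < ((b : Nat) : Int) := by exact_mod_cast hb
      have hcount : (if (0 : Int) < (N : Int) then
            (((N : Int) - 0 + ((b : Nat) : Int) - 1) / ((b : Nat) : Int)).toNat else 0)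
          = (N + b - 1) / b := by
        rw [if_pos (by exact_mod_cast Nat.lt_of_lt_of_le hm (le_of_lt hNm))]
        have h1 : (N : Int) - 0 + ((b : Nat) : Int) - 1 = ((N + b - 1 : Nat) : Int) := by
          push_cast; omega
        rw [h1, ← Int.natCast_div, Int.toNat_natCast]
      rw [PySem.List.pyRange_of_pos 0 (N : Int) hbpos, hcount,
        PySem.List.foldl_append_singleton_eq_map, List.map_map, List.nil_append]
      -- A's slices are drop/take blocks
      have hA : ((fun i => (PySem.List.slice data (some i) (some (i + ((b : Nat) : Int)))).sum)
            ∘ (fun k : Nat => (0 : Int) + ((b : Nat) : Int) * (k : Int)))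
          = (fun k : Nat => ((data.drop (b * k)).take b).sum) := by
        funext k
        have h1 : (0 : Int) + ((b : Nat) : Int) * (k : Int) = ((b * k : Nat) : Int) := by
          push_cast; ring
        simp only [Function.comp_apply, h1, PySem.List.slice_natCast_add]
      rw [hA]
      -- count bounds for rangeChunk
      set c : Nat := (N + b - 1) / b with hcdef
      have hdm : c * b + (N + b - 1) % b = N + b - 1 := by
        rw [hcdef, Nat.mul_comm]; exact Nat.div_add_mod _ _
      have hmod : (N + b - 1) % b < b := Nat.mod_lt _ hb
      have hc1 : N ≤ c * b := by omega
      have hc2 : c * b < N + b := by omega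
      rw [rangeChunk b hb c data hc1 hc2]
      -- B's loop
      have := loopChunk b hb data [] [] hb
      simp only [List.sum_nil, List.length_nil, Nat.cast_zero, List.nil_append] at this
      rw [this]
    · exact absurd h hle
    · -- data = [], max_points < 0: both return []
      subst hnil
      simp [PySem.List.pyRange]
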